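-- pv_equiv track=rewrite | github.com/all1m-algorithm-study/2021-1-Algorithm-Study | week3/Group2/boj4779_owl91391.py | kanto
-- ===== SOURCE A (Python) =====
-- def list_chunk(lst, n):
--     return [lst[i:i+n] for i in range(0, len(lst), n)]
--
-- def kanto (c,n) :
--     if len(c) == 1:
--         return c
--     else :
--         c1 = list_chunk(c,3**(n-1))
--         for i in range(len(c1[1])) :
--             c1[1][i] = ' '
--         if len(c1) == 1 :
--             return c1[0]+c1[1]+c1[2]
--         else :
--             return kanto(c1[0],n-1) + c1[1] + kanto(c1[2],n-1)
-- ===== SOURCE B (Python) =====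
-- def _blank(i):
--     # cell i of the Cantor pattern is blank iff some base-3 digit of i is 1
--     while i > 0:
--         if i % 3 == 1:
--             return True
--         i //= 3
--     return False
--
-- def kanto(c, n):
--     if len(c) == 1:
--         return c  # a single cell is already the whole pattern (base case of the construction)
--     return [' ' if _blank(i) else c[i] for i in range(3 ** n)]
-- ===== Notes on version B (the rewrite author's own statement) =====
-- stated objective: simpler
-- what changed: Replaces A's recursive divide-into-thirds (chunk, blank the middle chunk in place, recurse on the outer chunks) with a single comprehension over the pattern's 3^n cells that keeps or blanks each cell by the closed-form base-3 digit test; Pre_ excludes the inputs on which a version raises, in particular the sporadic lengths len(c) = 3^n - 3^j + 1 on which A's recursion happens to bottom out and return while B's c[i] read raises IndexError.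
import Mathlib
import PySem

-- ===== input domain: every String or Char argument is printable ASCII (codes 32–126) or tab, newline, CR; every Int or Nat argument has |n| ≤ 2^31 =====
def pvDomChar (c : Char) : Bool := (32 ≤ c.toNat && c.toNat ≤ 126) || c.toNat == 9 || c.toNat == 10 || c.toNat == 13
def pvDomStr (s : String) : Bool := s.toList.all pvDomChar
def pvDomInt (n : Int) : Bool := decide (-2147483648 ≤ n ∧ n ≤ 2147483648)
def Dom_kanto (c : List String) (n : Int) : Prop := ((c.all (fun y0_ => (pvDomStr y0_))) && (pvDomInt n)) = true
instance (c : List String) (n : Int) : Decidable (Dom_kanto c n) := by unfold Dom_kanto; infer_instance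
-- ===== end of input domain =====

-- B replaces A's recursive divide-into-thirds by one pass over the pattern's 3^n cells with
-- the closed-form base-3 digit test (simpler); A = B on Pre_ below.

-- ===== PORT A =====
-- list_chunk(lst, n) = [lst[i:i+n] for i in range(0, len(lst), n)]
def listChunk (lst : List String) (n : Int) : List (List String) :=
  (PySem.List.pyRange 0 lst.length n).map (fun i => PySem.List.slice lst (some i) (some (i + n)))

-- kanto, with fuel as a totality device only (the Python recursion reaches depth n on the
-- inputs of Pre_; every '[]' below marks a spot where the Python raises, which Pre_ excludes).
def kantoF : Nat → List String → Int → List String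
  | 0, _, _ => []
  | f + 1, c, n =>
    if c.length = 1 then c
    else if n < 1 then []   -- Python: 3**(n-1) is a float here, range/slicing raises TypeError
    else
      let c1 := listChunk c ((3 : Int) ^ (n - 1).toNat)
      match c1[1]? with
      | none => []          -- Python: c1[1] raises IndexError
      | some mid =>
        -- for i in range(len(c1[1])): c1[1][i] = ' '
        let mid' := (List.range mid.length).foldl (fun m i => m.set i " ") mid
        let c1 := c1.set 1 mid'
        if c1.length = 1 then []   -- dead branch: c1[1] above already raised when len(c1) == 1
        else
          match c1[0]?, c1[2]? with
          | some a, some b => kantoF f a (n - 1) ++ mid' ++ kantoF f b (n - 1)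
          | _, _ => []      -- Python: c1[2] raises IndexError

def kanto (c : List String) (n : Int) : List String := kantoF (n.toNat + 1) c n

-- ===== PORT B =====
-- _blank(i): while i > 0: if i % 3 == 1: return True; i //= 3; return False
-- (the while loop is ported with fuel i, which bounds its iteration count, so the
--  definition is structural and kernel-reducible)
def blankBF : Nat → Nat → Bool
  | 0, _ => false
  | f + 1, i => if i = 0 then false else if i % 3 = 1 then true else blankBF f (i / 3)

def blankB (i : Nat) : Bool := blankBF i i

-- the comprehension [' ' if _blank(i) else c[i] for i in range(3 ** n)], cell by cell in
-- Python's order: _blank(i) is tested first, and only a kept cell reads c[i] (none there =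
-- IndexError, excluded by Pre_)
def buildB (c : List String) : Nat → Nat → List String
  | _, 0 => []
  | i, fuel + 1 =>
    if blankB i then " " :: buildB c (i + 1) fuel
    else
      match (PySem.List.pyGet? c (i : Int)) with     -- c[i]
      | none => []          -- Python: c[i] raises IndexError
      | some x => x :: buildB c (i + 1) fuel

def kanto_alt (c : List String) (n : Int) : List String :=
  if c.length = 1 then c
  else if n < 0 then []     -- Python: 3**n is a float here, range raises TypeError
  else buildB c 0 ((3 : Nat) ^ n.toNat)

-- ===== PRECONDITION & SPEC =====
-- Pre_ excludes the inputs on which a Python version raises: for A, n < 1 with len(c) ≠ 1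
-- (3**(n-1) is a float: TypeError) and the lengths on which the chunking yields fewer than
-- three chunks (IndexError); for B, the lengths 1 < len(c) < 3^n — among them the sporadic
-- len(c) = 3^n - 3^j + 1 on which A's recursion happens to bottom out and return while B's
-- kept-cell read c[i] raises IndexError.  (Stated via Nat.log 3 so the Decidable instance
-- never computes 3^n for a huge n: for len(c) ≥ 1, 3^n ≤ len(c) ↔ n ≤ Nat.log 3 len(c).)
def Pre_kanto (c : List String) (n : Int) : Prop :=
  c.length = 1 ∨ (0 < n ∧ n.toNat ≤ Nat.log 3 c.length ∧ 1 < c.length)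
instance (c : List String) (n : Int) : Decidable (Pre_kanto c n) := by unfold Pre_kanto; infer_instance
def pvWitness_kanto : List String × Int := (["a", "b", "c"], 1)

def Spec_kanto (c : List String) (n : Int) (out : List String) : Prop := out = kanto_alt c n
instance (c : List String) (n : Int) (out : List String) : Decidable (Spec_kanto c n out) := by unfold Spec_kanto; infer_instance

-- ===== CLAIM (what is proved, stated in full; the proofs are below) =====
def Claim_equal_kanto : Prop := ∀ (c : List String) (n : Int), Dom_kanto c n → Pre_kanto c n → Spec_kanto c n (kanto c n)

-- ===== LEMMAS AND PROOFS =====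

-- the per-index digit-test pass over the first 3^k cells (both ports are related to this shape)
def altCore (l : List String) : List String :=
  (List.range l.length).map (fun i => if blankB i then " " else l.getD i "")

-- B's cell loop, when every cell index stays inside the list, is the digit-test map
theorem buildB_eq (c : List String) :
    ∀ (fuel i : Nat), i + fuel ≤ c.length →
      buildB c i fuel = (List.range' i fuel).map (fun j => if blankB j then " " else c.getD j "") := by
  intro fuel
  induction fuel with
  | zero => intro i _; rfl
  | succ fuel ih =>
    intro i h
    rw [List.range'_succ, List.map_cons, ← ih (i + 1) (by omega)]
    show (if blankB i then " " :: buildB c (i + 1) fuel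
      else match (PySem.List.pyGet? c (i : Int)) with
        | none => []
        | some x => x :: buildB c (i + 1) fuel) = _
    by_cases hb : blankB i
    · simp [hb]
    · have hi : i < c.length := by omega
      rw [PySem.List.pyGet?_natCast]
      simp [hb, List.getElem?_eq_getElem hi, List.getD_eq_getElem?_getD]

-- A's blanking loop rewrites every position of the middle chunk to ' '
theorem foldl_set_cons (s : String) (a : String) :
    ∀ (xs : List Nat) (acc : List String),
      xs.foldl (fun m i => m.set (i + 1) s) (a :: acc) = a :: xs.foldl (fun m i => m.set i s) acc := by
  intro xs
  induction xs with
  | nil => intro acc; rfl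
  | cons x xs ih => intro acc; simp only [List.foldl_cons, List.set_cons_succ]; exact ih _

theorem foldl_set_replicate (s : String) :
    ∀ (l : List String), (List.range l.length).foldl (fun m i => m.set i s) l = List.replicate l.length s := by
  intro l
  induction l with
  | nil => rfl
  | cons x xs ih =>
    simp only [List.length_cons, List.range_succ_eq_map, List.foldl_cons, List.set_cons_zero,
      List.foldl_map, foldl_set_cons, List.replicate_succ]
    rw [ih]

-- the fuel i suffices: blankB satisfies the while loop's defining equation
theorem blankBF_zero (g : Nat) : blankBF g 0 = false := by
  match g with
  | 0 => rfl
  | g + 1 => rfl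

theorem blankBF_mono : ∀ (f g i : Nat), i ≤ f → i ≤ g → blankBF f i = blankBF g i := by
  intro f
  induction f with
  | zero =>
    intro g i hif _
    rw [Nat.le_zero.mp hif, blankBF_zero, blankBF_zero]
  | succ f ih =>
    intro g i hif hig
    match i, g with
    | 0, g => rw [blankBF_zero, blankBF_zero]
    | i + 1, g + 1 =>
      show (if i + 1 = 0 then false else if (i + 1) % 3 = 1 then true else blankBF f ((i + 1) / 3)) =
        (if i + 1 = 0 then false else if (i + 1) % 3 = 1 then true else blankBF g ((i + 1) / 3))
      by_cases h1 : (i + 1) % 3 = 1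
      · simp [h1]
      · have hd : (i + 1) / 3 < i + 1 := Nat.div_lt_self (by omega) (by omega)
        simp only [h1, if_false, if_neg (Nat.succ_ne_zero i)]
        exact ih g ((i + 1) / 3) (by omega) (by omega)

theorem blankB_eq (i : Nat) :
    blankB i = if i = 0 then false else if i % 3 = 1 then true else blankB (i / 3) := by
  unfold blankB
  match i with
  | 0 => rfl
  | g + 1 =>
    show (if g + 1 = 0 then false else if (g + 1) % 3 = 1 then true else blankBF g ((g + 1) / 3)) = _
    by_cases h1 : (g + 1) % 3 = 1
    · simp [h1]
    · simp only [h1, if_false, if_neg (Nat.succ_ne_zero g)]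
      have hd : (g + 1) / 3 < g + 1 := Nat.div_lt_self (by omega) (by omega)
      exact blankBF_mono g ((g + 1) / 3) ((g + 1) / 3) (by omega) (by omega)

-- digits of 3^m + i (i < 3^m) contain a leading 1
theorem blankB_mid (m : Nat) : ∀ i, i < 3 ^ m → blankB (3 ^ m + i) = true := by
  induction m with
  | zero =>
    intro i hi
    have : i = 0 := by omega
    subst this
    show blankB 1 = true
    rw [blankB_eq]
    norm_num
  | succ m ih =>
    intro i hi
    rw [blankB_eq]
    have h3 : 3 ^ (m + 1) = 3 * 3 ^ m := by ring
    by_cases h1 : i % 3 = 1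
    · simp [h3, h1]
    · have hm : (3 ^ (m + 1) + i) % 3 = i % 3 := by rw [h3, Nat.mul_add_mod]
      have hd : (3 ^ (m + 1) + i) / 3 = 3 ^ m + i / 3 := by
        rw [h3, Nat.mul_add_div (by omega)]
      simp only [show 3 ^ (m + 1) + i ≠ 0 by positivity, hm, h1, if_false, hd]
      exact ih (i / 3) (by omega)

-- digits of 2*3^m + i (i < 3^m) are a leading 2 followed by the digits of i
theorem blankB_last (m : Nat) : ∀ i, i < 3 ^ m → blankB (2 * 3 ^ m + i) = blankB i := by
  induction m with
  | zero =>
    intro i hi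
    have : i = 0 := by omega
    subst this
    show blankB 2 = blankB 0
    rw [blankB_eq, blankB_eq]
    norm_num
  | succ m ih =>
    intro i hi
    have h3 : 2 * 3 ^ (m + 1) + i = 3 * (2 * 3 ^ m) + i := by ring
    have hm : (2 * 3 ^ (m + 1) + i) % 3 = i % 3 := by rw [h3, Nat.mul_add_mod]
    have hd : (2 * 3 ^ (m + 1) + i) / 3 = 2 * 3 ^ m + i / 3 := by
      rw [h3, Nat.mul_add_div (by omega)]
    rw [blankB_eq]
    by_cases h1 : i % 3 = 1
    · have hi0 : i ≠ 0 := by omega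
      conv_rhs => rw [blankB_eq]
      simp [hm, h1, hi0]
    · simp only [show 2 * 3 ^ (m + 1) + i ≠ 0 by positivity, hm, h1, if_false, hd]
      rw [ih (i / 3) (by omega)]
      by_cases hi0 : i = 0
      · simp [hi0]
      · conv_rhs => rw [blankB_eq]
        simp [hi0, h1]

-- the digit-test map splits along the three thirds of a list with 2*3^m < len ≤ 3*3^m
theorem alt_split (c : List String) (m : Nat) (h1 : 2 * 3 ^ m < c.length) (h2 : c.length ≤ 3 * 3 ^ m) :
    altCore c =
      altCore (c.take (3 ^ m)) ++ List.replicate (3 ^ m) " " ++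
        altCore ((c.drop (2 * 3 ^ m)).take (3 ^ m)) := by
  set S := 3 ^ m with hSdef
  have hS : 0 < S := by positivity
  set t := c.length - 2 * S with htdef
  have ht : (c.take S).length = S := by simp; omega
  have htd : ((c.drop (2 * S)).take S).length = t := by simp; omega
  unfold altCore
  rw [ht, htd, show c.length = S + (S + t) by omega, List.range_add, List.range_add]
  simp only [List.map_append, List.map_map, List.append_assoc]
  congr 1
  · apply List.map_congr_left
    intro i hi
    have hi' : i < S := List.mem_range.mp hi
    congr 1
    simp [List.getD_eq_getElem?_getD, List.getElem?_take, hi']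
  · congr 1
    · have h2' : ∀ i ∈ List.range S,
          ((fun i => if blankB i then " " else c.getD i "") ∘ (fun x => S + x)) i = (fun _ => " ") i := by
        intro i hi
        have hb := blankB_mid m i (List.mem_range.mp hi)
        rw [← hSdef] at hb
        simp [hb]
      rw [List.map_congr_left h2', List.map_const', List.length_range]
    · apply List.map_congr_left
      intro i hi
      have hi' : i < t := List.mem_range.mp hi
      have hi'' : i < S := by omega
      have hb : blankB (S + (S + i)) = blankB i := by
        rw [show S + (S + i) = 2 * S + i by ring]
        exact blankB_last m i hi''
      simp only [Function.comp_apply, hb]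
      congr 1
      simp [List.getD_eq_getElem?_getD, hi', hi'', List.getElem?_drop]
      rw [show 2 * S + i = S + (S + i) by ring]

-- A's chunking of a list with 2S < len: the first three chunks are the three S-slices
theorem listChunk_parts (c : List String) (S : Nat) (hS : 0 < S) (h1 : 2 * S < c.length) :
    ∃ rest, listChunk c ((S : Nat) : Int) =
      [c.take S, (c.drop S).take S, (c.drop (2 * S)).take S] ++ rest := by
  unfold listChunk
  rw [PySem.List.pyRange_of_pos _ _ (by exact_mod_cast hS)]
  set q := (((c.length : Int) - 0 + (S : Int) - 1) / (S : Int)).toNat with hq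
  have h3q : 3 ≤ q := by
    have : (3 : Int) ≤ ((c.length : Int) - 0 + (S : Int) - 1) / (S : Int) := by
      rw [Int.le_ediv_iff_mul_le (by exact_mod_cast hS)]
      push_cast
      omega
    omega
  rw [if_pos (by push_cast; omega), show q = 3 + (q - 3) by omega, List.range_add]
  simp only [List.map_append]
  have hfirst : List.map (fun i => PySem.List.slice c (some i) (some (i + (S : Int))))
      (List.map (fun k : Nat => 0 + (S : Int) * (k : Int)) (List.range 3)) =
      [c.take S, (c.drop S).take S, (c.drop (2 * S)).take S] := by
    simp only [List.range_succ, List.range_zero, List.map_append, List.map_cons, List.map_nil,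
      List.nil_append]
    norm_num
    constructor
    · exact PySem.List.slice_natCast_add c S S
    · rw [show (S : Int) * 2 = ((2 * S : Nat) : Int) by push_cast; ring]
      exact PySem.List.slice_natCast_add c (2 * S) S
  rw [hfirst]
  exact ⟨_, rfl⟩

-- one unfolding of A's recursion, on any list with 2*3^m < len and n = m+1
theorem kantoF_succ_step (f m : Nat) (c : List String) (hbig : 2 * 3 ^ m < c.length) :
    kantoF (f + 1) c (((m + 1 : Nat)) : Int) =
      kantoF f (c.take (3 ^ m)) (m : Int) ++ List.replicate (3 ^ m) " " ++
        kantoF f ((c.drop (2 * 3 ^ m)).take (3 ^ m)) (m : Int) := by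
  rw [kantoF]
  have hS : 0 < 3 ^ m := by positivity
  have hL1 : ¬ (c.length = 1) := by omega
  have hn1 : ¬ (((m + 1 : Nat) : Int) < 1) := by push_cast; omega
  rw [if_neg hL1, if_neg hn1]
  have hexp : (((m + 1 : Nat) : Int) - 1).toNat = m := by omega
  have hpow : (3 : Int) ^ (((m + 1 : Nat) : Int) - 1).toNat = ((3 ^ m : Nat) : Int) := by
    rw [hexp]; push_cast; ring
  obtain ⟨rest, hchunk⟩ := listChunk_parts c (3 ^ m) hS hbig
  rw [hpow, hchunk]
  have hmidlen : ((c.drop (3 ^ m)).take (3 ^ m)).length = 3 ^ m := by simp; omega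
  simp only [List.cons_append, List.nil_append, List.getElem?_cons_succ,
    List.getElem?_cons_zero]
  rw [foldl_set_replicate, hmidlen]
  simp only [List.set_cons_succ, List.set_cons_zero, List.length_cons,
    List.getElem?_cons_succ, List.getElem?_cons_zero]
  rw [if_neg (by omega), show ((m + 1 : Nat) : Int) - 1 = ((m : Nat) : Int) by push_cast; ring]

-- the invariant's hypothesis holds for an exactly-full list
theorem G_of_full (m L : Nat) (h : L = 3 ^ m) : L = 1 ∨ (1 ≤ m ∧ 3 ^ m ≤ L) := by
  match m with
  | 0 => left; simpa using h
  | m + 1 => right; omega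

-- main invariant: on a singleton or a list covering the pattern (len ≥ 3^k), A's recursion
-- computes the digit-test map of the first 3^k elements
theorem kantoF_eq_alt : ∀ (f k : Nat) (c : List String),
    (c.length = 1 ∨ (1 ≤ k ∧ 3 ^ k ≤ c.length)) →
    k < f → kantoF f c (k : Int) = altCore (c.take (3 ^ k)) := by
  intro f
  induction f with
  | zero => intro k c h hk; omega
  | succ f ih =>
    intro k c hG hk
    by_cases hL1 : c.length = 1
    · match c, hL1 with
      | [x], _ =>
        show kantoF (f + 1) [x] (k : Int) = _
        rw [kantoF]
        simp only [List.length_cons, List.length_nil]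
        rw [List.take_of_length_le (by simp; exact Nat.one_le_pow _ _ (by omega))]
        show _ = [if blankB 0 then " " else x]
        rw [blankB_eq]
        norm_num
    · cases k with
      | zero =>
        exfalso
        rcases hG with h | ⟨h1, _⟩
        · exact hL1 h
        · omega
      | succ m =>
        have hmf : m < f := by omega
        have hS : 0 < 3 ^ m := by positivity
        have h3 : 3 ^ (m + 1) = 3 * 3 ^ m := by ring
        rcases hG with h | ⟨_, hBig⟩
        · exact absurd h hL1
        · -- len ≥ 3^(m+1): A works on the first 3^(m+1) = 3*3^m elements
          have hbig : 2 * 3 ^ m < c.length := by omega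
          rw [kantoF_succ_step f m c hbig]
          have htake : (c.take (3 ^ m)).length = 3 ^ m := by simp; omega
          have htail : (((c.drop (2 * 3 ^ m)).take (3 ^ m))).length = 3 ^ m := by simp; omega
          have eA : (c.take (3 ^ m)).take (3 ^ m) = c.take (3 ^ m) :=
            List.take_of_length_le (by omega)
          have eT : ((c.drop (2 * 3 ^ m)).take (3 ^ m)).take (3 ^ m) =
              (c.drop (2 * 3 ^ m)).take (3 ^ m) :=
            List.take_of_length_le (by omega)
          rw [ih m _ (G_of_full m _ htake) hmf, ih m _ (G_of_full m _ htail) hmf,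
            eA, eT]
          have e1 : (c.take (3 ^ (m + 1))).take (3 ^ m) = c.take (3 ^ m) := by
            rw [List.take_take]
            congr 1
            omega
          have e2 : ((c.take (3 ^ (m + 1))).drop (2 * 3 ^ m)).take (3 ^ m) =
              (c.drop (2 * 3 ^ m)).take (3 ^ m) := by
            rw [List.drop_take, List.take_take]
            congr 1
            omega
          rw [alt_split (c.take (3 ^ (m + 1))) m (by simp; omega) (by simp; omega), e1, e2]

-- Pre_'s Nat.log phrasing unfolded: 3^n ≤ L ↔ n ≤ log₃ L (L ≥ 1)
theorem pow_le_iff_log (L n : Nat) (hL : 1 ≤ L) : 3 ^ n ≤ L ↔ n ≤ Nat.log 3 L :=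
  (Nat.pow_le_iff_le_log (by omega) (by omega))

-- B computes the digit-test map of the first 3^n cells once the list covers them
theorem alt_covers (c : List String) (n : Int) (h0 : 0 ≤ n) (hlen : 3 ^ n.toNat ≤ c.length)
    (hL : 1 < c.length) : kanto_alt c n = altCore (c.take (3 ^ n.toNat)) := by
  unfold kanto_alt
  rw [if_neg (by omega), if_neg (by omega),
    buildB_eq c (3 ^ n.toNat) 0 (by omega)]
  unfold altCore
  have htake : (c.take (3 ^ n.toNat)).length = 3 ^ n.toNat := by simp; omega
  rw [htake, List.range'_eq_map_range, List.map_map]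
  apply List.map_congr_left
  intro i hi
  have hi' : i < 3 ^ n.toNat := List.mem_range.mp hi
  simp only [Function.comp_apply, Nat.zero_add]
  congr 1
  simp [List.getD_eq_getElem?_getD, List.getElem?_take, hi']

-- ===== VERDICT (by name: the statement is the Claim_ definition above) =====
theorem kanto_spec : Claim_equal_kanto := by
  intro c n _hdom hpre
  unfold Spec_kanto
  rcases hpre with hL1 | ⟨hn1, hlog, hL2⟩
  · -- len = 1 (any n): both early-return the singleton unchanged
    match c, hL1 with
    | [x], _ =>
      show kantoF (n.toNat + 1) [x] n = kanto_alt [x] n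
      rw [kantoF]
      unfold kanto_alt
      rfl
  · -- 1 ≤ n and len ≥ 3^n: both return the 3^n-cell pattern over the first 3^n elements
    have hle : 3 ^ n.toNat ≤ c.length := (pow_le_iff_log _ _ (by omega)).mpr hlog
    have hcast : n = ((n.toNat : Nat) : Int) := (Int.toNat_of_nonneg (by omega)).symm
    rw [alt_covers c n (by omega) hle hL2]
    unfold kanto
    rw [hcast, Int.toNat_natCast,
      kantoF_eq_alt (n.toNat + 1) n.toNat c (Or.inr ⟨by omega, hle⟩) (by omega)]
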